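-- pv_equiv track=rewrite | github.com/felixphool/Programming-Practice-C-Cpp | Practice Assignments/ASSIGNMENT 24/z.py | unlockingKey
-- ===== SOURCE A (Python) =====
-- def unlockingKey(key):
--     key1=len(str(key))
--     list1=[]
--     for i in range(key1):
--         list1.append(key%10)
--         key=key//10
--     list1.sort()
--     count=0
--     for j in range(key1):
--         if(list1[j]==0):
--             count=count+1
--
--     temp=list1[0]
--     list1[0]=list1[count]
--     list1[count]=temp
--
--     s = [str(i) for i in list1]
--     res = int("".join(s))
--     return res
-- ===== SOURCE B (Python) =====
-- def unlockingKey(key):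
--     # counting-sort re-implementation: tally digits into a 10-bucket table
--     # during the same %10 // 10 extraction, then emit the result directly:
--     # smallest nonzero digit first, then the zeros, then the remaining
--     # nonzero digits in ascending order.
--     counts = [0] * 10
--     for _ in range(len(str(key))):
--         counts[key % 10] += 1
--         key = key // 10
--     nz = [d for d in range(1, 10) for _ in range(counts[d])]
--     first = nz[0]
--     return int(str(first) + "0" * counts[0] + "".join(str(d) for d in nz[1:]))
-- ===== Notes on version B (the rewrite author's own statement) =====
-- stated objective: alternative
-- what changed: Replaces the comparison sort plus explicit zero-count/swap with a 10-bucket digit tally built during the same %10///10 extraction, emitting the answer directly as smallest-nonzero digit, then the zeros, then the remaining nonzero digits in ascending order.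
import Mathlib
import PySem

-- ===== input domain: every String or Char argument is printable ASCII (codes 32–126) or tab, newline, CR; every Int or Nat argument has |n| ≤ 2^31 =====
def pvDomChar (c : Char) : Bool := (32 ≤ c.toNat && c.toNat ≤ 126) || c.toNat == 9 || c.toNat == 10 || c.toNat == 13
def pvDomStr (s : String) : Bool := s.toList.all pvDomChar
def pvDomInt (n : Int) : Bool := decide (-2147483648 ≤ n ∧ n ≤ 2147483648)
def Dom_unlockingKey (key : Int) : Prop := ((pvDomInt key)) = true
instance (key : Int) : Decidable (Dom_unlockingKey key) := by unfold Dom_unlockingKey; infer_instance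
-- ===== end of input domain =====

-- B replaces A's comparison sort plus zero-count/swap by a 10-bucket digit tally and
-- direct emission of the result (alternative decomposition; return values proved equal).

-- ===== PORT A =====
def unlockingKey (key : Int) : Int :=
  let key1 := PySem.Str.len (PySem.Int.toStr key)
  let st := (PySem.List.pyRange 0 key1).foldl
      (fun (st : List Int × Int) _ =>
        (st.1 ++ [PySem.Int.mod st.2 10], PySem.Int.floordiv st.2 10)) ([], key)
  let list1 := PySem.List.sorted st.1 (fun x => x) false
  let count := (PySem.List.pyRange 0 key1).foldl
      (fun c j => if PySem.List.pyGetD list1 j 0 == 0 then c + 1 else c) (0 : Int)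
  let temp := PySem.List.pyGetD list1 0 0              -- list1[0]; in range under Pre_
  let list2 := PySem.List.pySetD list1 0 (PySem.List.pyGetD list1 count 0)
  let list3 := PySem.List.pySetD list2 count temp
  let s := list3.map (fun i => PySem.Int.toStr i)
  (PySem.Int.ofStr? (PySem.Str.join "" s)).getD 0      -- int(...) never fails here

-- ===== PORT B =====
def unlockingKey_alt (key : Int) : Int :=
  let st := (PySem.List.pyRange 0 (PySem.Str.len (PySem.Int.toStr key))).foldl
      (fun (st : List Int × Int) _ =>
        (PySem.List.pySetD st.1 (PySem.Int.mod st.2 10)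
          (PySem.List.pyGetD st.1 (PySem.Int.mod st.2 10) 0 + 1),
         PySem.Int.floordiv st.2 10)) (PySem.List.pyRepeat [(0 : Int)] 10, key)
  let counts := st.1
  let nz := (PySem.List.pyRange 1 10).flatMap
      (fun d => (PySem.List.pyRange 0 (PySem.List.pyGetD counts d 0)).map (fun _ => d))
  let first := PySem.List.pyGetD nz 0 0               -- nz[0]; in range under Pre_
  -- "0" * counts[0] ported by hand as a replicate (exact: n ≤ 0 gives "")
  (PySem.Int.ofStr? (PySem.Int.toStr first
      ++ String.ofList (List.replicate (PySem.List.pyGetD counts 0 0).toNat '0')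
      ++ PySem.Str.join "" ((PySem.List.slice nz (some 1) none).map PySem.Int.toStr))).getD 0

-- ===== PRECONDITION & SPEC =====
-- Pre_ excludes key = 0, the only input on which Python A raises (IndexError at list1[count]).
def Pre_unlockingKey (key : Int) : Prop := key ≠ 0
instance (key : Int) : Decidable (Pre_unlockingKey key) := by unfold Pre_unlockingKey; infer_instance
def pvWitness_unlockingKey : Int := 7

def Spec_unlockingKey (key : Int) (out : Int) : Prop := out = unlockingKey_alt key
instance (key : Int) (out : Int) : Decidable (Spec_unlockingKey key out) := by unfold Spec_unlockingKey; infer_instance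

-- ===== CLAIM (what is proved, stated in full; the proofs are below) =====
def Claim_equal_unlockingKey : Prop :=
  ∀ (key : Int), Dom_unlockingKey key → Pre_unlockingKey key → Spec_unlockingKey key (unlockingKey key)

-- ===== LEMMAS AND PROOFS =====

-- the digit stream and the iterated quotient of A's/B's shared extraction loop
def digsP : Nat → Int → List Int
  | 0, _ => []
  | n + 1, k => (k % 10) :: digsP n (k / 10)

def itkP : Nat → Int → Int
  | 0, k => k
  | n + 1, k => itkP n (k / 10)

-- the nonzero digits in ascending order, with multiplicity
def nzcat (M : List Int) : List Int :=
  ([1, 2, 3, 4, 5, 6, 7, 8, 9] : List Int).flatMap (fun d => List.replicate (M.count d) d)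

theorem mod10 (k : Int) : PySem.Int.mod k 10 = k % 10 :=
  PySem.Int.mod_eq_emod_of_pos (by norm_num)

theorem fdiv10 (k : Int) : PySem.Int.floordiv k 10 = k / 10 :=
  PySem.Int.floordiv_eq_ediv_of_pos (by norm_num)

theorem digs_len (n : Nat) (k : Int) : (digsP n k).length = n := by
  induction n generalizing k with
  | zero => rfl
  | succ n ih => simp [digsP, ih]

theorem digs_bound (n : Nat) (k : Int) : ∀ x ∈ digsP n k, 0 ≤ x ∧ x < 10 := by
  induction n generalizing k with
  | zero => simp [digsP]
  | succ n ih =>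
    intro x hx
    rcases List.mem_cons.mp hx with h | h
    · subst h; omega
    · exact ih _ x h

theorem loopA (L : List Int) (acc : List Int) (k : Int) :
    L.foldl (fun (st : List Int × Int) _ =>
        (st.1 ++ [st.2 % 10], st.2 / 10)) (acc, k)
      = (acc ++ digsP L.length k, itkP L.length k) := by
  induction L generalizing acc k with
  | nil => simp [digsP, itkP]
  | cons a t ih =>
    rw [List.foldl_cons]
    dsimp only
    rw [ih]
    simp [digsP, itkP]

theorem loopB_get (L : List Int) (acc : List Int) (k : Int) (hlen : acc.length = 10) :
    ∀ d : Int, 0 ≤ d → d < 10 →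
      PySem.List.pyGetD (L.foldl (fun (st : List Int × Int) _ =>
          (PySem.List.pySetD st.1 (st.2 % 10)
            (PySem.List.pyGetD st.1 (st.2 % 10) 0 + 1),
           st.2 / 10)) (acc, k)).1 d 0
      = PySem.List.pyGetD acc d 0 + ((digsP L.length k).count d : Int) := by
  induction L generalizing acc k with
  | nil => intro d _ _; simp [digsP]
  | cons a t ih =>
    intro d hd0 hd10
    rw [List.foldl_cons]
    dsimp only
    have hmod0 : (0 : Int) ≤ k % 10 := by omega
    have hmod10 : k % 10 < 10 := by omega
    have hlen' : (PySem.List.pySetD acc (k % 10)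
        (PySem.List.pyGetD acc (k % 10) 0 + 1)).length = 10 := by
      rw [PySem.List.length_pySetD, hlen]
    rw [ih _ _ hlen' d hd0 hd10]
    have hget : PySem.List.pyGetD (PySem.List.pySetD acc (k % 10)
        (PySem.List.pyGetD acc (k % 10) 0 + 1)) d 0
        = PySem.List.pyGetD acc d 0 + (if d = k % 10 then 1 else 0) := by
      rw [PySem.List.pySetD_of_nonneg _ _ hmod0]
      rw [PySem.List.pyGetD_eq_getElem _ _ hd0 (by rw [List.length_set, hlen]; omega)]
      rw [List.getElem_set]
      rw [PySem.List.pyGetD_eq_getElem _ _ hmod0 (by rw [hlen]; exact_mod_cast hmod10)]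
      rw [PySem.List.pyGetD_eq_getElem _ _ hd0 (by rw [hlen]; omega)]
      by_cases h : d = k % 10
      · subst h
        simp
      · rw [if_neg (by omega), if_neg h, add_zero]
    rw [hget]
    simp only [List.length_cons, digsP, List.count_cons, beq_iff_eq]
    by_cases hdk : d = k % 10
    · rw [if_pos hdk, if_pos hdk.symm]
      push_cast
      ring
    · rw [if_neg hdk, if_neg (fun hh => hdk hh.symm)]
      push_cast
      ring

theorem digs_allzero (n : Nat) (k : Int) (h : ∀ x ∈ digsP n k, x = 0) :
    k = itkP n k * 10 ^ n := by
  induction n generalizing k with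
  | zero => simp [itkP]
  | succ n ih =>
    have h0 : k % 10 = 0 := h _ (by simp [digsP])
    have ht : k / 10 = itkP n (k / 10) * 10 ^ n :=
      ih _ (fun x hx => h x (by simp only [digsP, List.mem_cons]; exact Or.inr hx))
    have hk : k = k / 10 * 10 := by omega
    calc k = k / 10 * 10 := hk
    _ = itkP n (k / 10) * 10 ^ n * 10 := by rw [← ht]
    _ = itkP (n + 1) k * 10 ^ (n + 1) := by rw [itkP]; ring

-- lower-bound companions of Mathlib's Nat.toDigits_length
theorem toDigitsCore_len_gt : ∀ (f n : Nat) (l : List Char), n < f →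
    l.length < (Nat.toDigitsCore 10 f n l).length := by
  intro f
  induction f with
  | zero => intro n l h; omega
  | succ f ih =>
    intro n l h
    simp only [Nat.toDigitsCore]
    by_cases h10 : n / 10 = 0
    · simp [h10]
    · simp only [h10, if_false]
      have hrec := ih (n / 10) (Nat.digitChar (n % 10) :: l) (by omega)
      simp only [List.length_cons] at hrec
      omega

theorem toDigitsCore_lt : ∀ (f n : Nat) (l : List Char), n < f →
    n < 10 ^ ((Nat.toDigitsCore 10 f n l).length - l.length) := by
  intro f
  induction f with
  | zero => intro n l h; omega
  | succ f ih =>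
    intro n l h
    simp only [Nat.toDigitsCore]
    by_cases h10 : n / 10 = 0
    · simp only [h10, if_true, List.length_cons]
      have hn : n < 10 := by omega
      simpa using hn
    · simp only [h10, if_false]
      have hrec := ih (n / 10) (Nat.digitChar (n % 10) :: l) (by omega)
      have hlen := toDigitsCore_len_gt f (n / 10) (Nat.digitChar (n % 10) :: l) (by omega)
      simp only [List.length_cons] at hrec hlen
      set L := (Nat.toDigitsCore 10 f (n / 10) (Nat.digitChar (n % 10) :: l)).length with hL
      have he : L - l.length = (L - (l.length + 1)) + 1 := by omega
      rw [he, pow_succ]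
      have h1 : n / 10 + 1 ≤ 10 ^ (L - (l.length + 1)) := hrec
      have h2 : n < (n / 10 + 1) * 10 := by omega
      calc n < (n / 10 + 1) * 10 := h2
      _ ≤ 10 ^ (L - (l.length + 1)) * 10 := Nat.mul_le_mul_right _ h1

theorem lt_pow_toDigits_length (m : Nat) : m < 10 ^ (Nat.toDigits 10 m).length := by
  have := toDigitsCore_lt (m + 1) m [] (Nat.lt_succ_self m)
  simpa [Nat.toDigits] using this

theorem natAbs_lt_pow_len (k : Int) : k.natAbs < 10 ^ (PySem.Int.toChars k).length := by
  unfold PySem.Int.toChars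
  by_cases h : k < 0
  · simp only [h, if_true, List.length_cons]
    calc k.natAbs < 10 ^ (Nat.toDigits 10 k.natAbs).length := lt_pow_toDigits_length _
    _ ≤ 10 ^ ((Nat.toDigits 10 k.natAbs).length + 1) :=
        Nat.pow_le_pow_right (by norm_num) (by omega)
  · simp only [h, if_false]
    have hk : k.natAbs = k.toNat := by omega
    rw [hk]
    exact lt_pow_toDigits_length _

theorem exists_nonzero (k : Int) (hk : k ≠ 0) :
    ∃ x ∈ digsP (PySem.Int.toChars k).length k, x ≠ 0 := by
  by_contra hall
  push_neg at hall
  have hz : k = itkP (PySem.Int.toChars k).length k * 10 ^ (PySem.Int.toChars k).length :=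
    digs_allzero _ _ hall
  have hit : itkP (PySem.Int.toChars k).length k ≠ 0 := by
    intro h0
    apply hk
    rw [h0, zero_mul] at hz
    exact hz
  have hge : 10 ^ (PySem.Int.toChars k).length ≤ k.natAbs := by
    have h1 : 1 ≤ (itkP (PySem.Int.toChars k).length k).natAbs := by omega
    calc 10 ^ (PySem.Int.toChars k).length
        = 1 * 10 ^ (PySem.Int.toChars k).length := (one_mul _).symm
    _ ≤ (itkP (PySem.Int.toChars k).length k).natAbs * 10 ^ (PySem.Int.toChars k).length :=
        Nat.mul_le_mul_right _ h1
    _ = k.natAbs := by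
        conv_rhs => rw [hz]
        rw [Int.natAbs_mul, Int.natAbs_pow]
        norm_num
  exact absurd (natAbs_lt_pow_len k) (not_lt.mpr hge)

theorem pairwise_flatMap_replicate (ds : List Int) (f : Int → Nat)
    (h : ds.Pairwise (· ≤ ·)) :
    (ds.flatMap (fun d => List.replicate (f d) d)).Pairwise (· ≤ ·) := by
  induction ds with
  | nil => simp
  | cons d t ih =>
    rcases List.pairwise_cons.mp h with ⟨hd, ht⟩
    simp only [List.flatMap_cons]
    refine List.pairwise_append.mpr ⟨List.pairwise_replicate.mpr (by simp), ih ht, ?_⟩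
    intro a ha b hb
    rcases List.eq_of_mem_replicate ha with rfl
    rcases List.mem_flatMap.mp hb with ⟨d', hd', hb'⟩
    rcases List.eq_of_mem_replicate hb' with rfl
    exact hd _ hd'

set_option maxHeartbeats 1000000 in
theorem sorted_canon (M : List Int) (hb : ∀ x ∈ M, 0 ≤ x ∧ x < 10) :
    PySem.List.sorted M (fun x => x) false = List.replicate (M.count 0) 0 ++ nzcat M := by
  have hform : List.replicate (M.count 0) (0 : Int) ++ nzcat M
      = ([0, 1, 2, 3, 4, 5, 6, 7, 8, 9] : List Int).flatMap
          (fun d => List.replicate (M.count d) d) := by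
    simp [nzcat]
  rw [hform]
  apply PySem.List.sorted_id_eq_of_perm_of_pairwise
  · apply List.perm_iff_count.mpr
    intro a
    by_cases ha : 0 ≤ a ∧ a < 10
    · obtain ⟨h1, h2⟩ := ha
      interval_cases a <;>
        · simp only [List.flatMap_cons, List.flatMap_nil, List.append_nil, List.count_append,
            List.count_replicate, beq_iff_eq]
          norm_num
    · have hA : M.count a = 0 :=
        List.count_eq_zero.mpr (fun hm => ha (hb a hm))
      have hL : List.count a (([0, 1, 2, 3, 4, 5, 6, 7, 8, 9] : List Int).flatMap
          (fun d => List.replicate (M.count d) d)) = 0 := by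
        apply List.count_eq_zero.mpr
        intro hm
        rcases List.mem_flatMap.mp hm with ⟨d, hd, hrep⟩
        rcases List.eq_of_mem_replicate hrep with rfl
        apply ha
        fin_cases hd <;> constructor <;> norm_num
      rw [hL, hA]
  · exact pairwise_flatMap_replicate _ _ (by decide)

theorem nz_mem_ne_zero (M : List Int) (x : Int) (hx : x ∈ nzcat M) : x ≠ 0 := by
  rcases List.mem_flatMap.mp hx with ⟨d, hd, hx'⟩
  rcases List.eq_of_mem_replicate hx' with rfl
  fin_cases hd <;> decide

theorem nz_ne_nil (M : List Int) (hb : ∀ x ∈ M, 0 ≤ x ∧ x < 10)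
    (hex : ∃ x ∈ M, x ≠ 0) : nzcat M ≠ [] := by
  rcases hex with ⟨x, hxM, hx0⟩
  have hcnt : 0 < M.count x := List.count_pos_iff.mpr hxM
  have hmem : x ∈ nzcat M := by
    apply List.mem_flatMap.mpr
    refine ⟨x, ?_, List.mem_replicate.mpr ⟨by omega, rfl⟩⟩
    obtain ⟨h1, h2⟩ := hb x hxM
    have hcase : x = 1 ∨ x = 2 ∨ x = 3 ∨ x = 4 ∨ x = 5 ∨ x = 6 ∨ x = 7 ∨ x = 8 ∨ x = 9 := by
      omega
    rcases hcase with h | h | h | h | h | h | h | h | h <;> subst h <;> decide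
  intro h; rw [h] at hmem; exact absurd hmem (List.not_mem_nil)

theorem join_empty_flatten : ∀ (xss : List (List Char)),
    PySem.Chars.join [] xss = xss.flatten
  | [] => rfl
  | [a] => by simp [PySem.Chars.join, List.intercalate]
  | a :: b :: t => by
    have ih := join_empty_flatten (b :: t)
    simp only [PySem.Chars.join, List.intercalate] at ih ⊢
    rw [List.intersperse_cons₂, List.flatten_cons, List.flatten_cons, ih]
    simp

theorem set_append_len {α : Type} (l1 l2 : List α) (a b : α) :
    (l1 ++ a :: l2).set l1.length b = l1 ++ b :: l2 := by
  induction l1 with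
  | nil => rfl
  | cons x t ih => simp [ih]

-- the swap A performs on the sorted list, evaluated on its canonical shape
theorem swap_part (c0 : Nat) (x : Int) (rest : List Int) :
    PySem.List.pySetD (PySem.List.pySetD (List.replicate c0 (0 : Int) ++ x :: rest) 0
        (PySem.List.pyGetD (List.replicate c0 (0 : Int) ++ x :: rest) (c0 : Int) 0))
      (c0 : Int) (PySem.List.pyGetD (List.replicate c0 (0 : Int) ++ x :: rest) 0 0)
    = x :: List.replicate c0 (0 : Int) ++ rest := by
  have hget : PySem.List.pyGetD (List.replicate c0 (0 : Int) ++ x :: rest) (c0 : Int) 0 = x := by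
    rw [PySem.List.pyGetD_natCast]
    rw [List.getD_eq_getElem?_getD]
    rw [List.getElem?_append_right (by simp)]
    simp
  rw [hget]
  cases c0 with
  | zero =>
    simp only [List.replicate_zero, List.nil_append, Nat.cast_zero]
    rw [PySem.List.pyGetD_zero_cons]
    rw [PySem.List.pySetD_of_nonneg _ _ le_rfl]
    simp only [Int.toNat_zero]
    rw [PySem.List.pySetD_of_nonneg _ _ le_rfl]
    simp
  | succ c =>
    have hrep : List.replicate (c + 1) (0 : Int) ++ x :: rest
        = 0 :: (List.replicate c (0 : Int) ++ x :: rest) := by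
      simp [List.replicate_succ]
    rw [hrep, PySem.List.pyGetD_zero_cons]
    rw [PySem.List.pySetD_of_nonneg _ _ le_rfl]
    simp only [Int.toNat_zero, List.set_cons_zero]
    rw [PySem.List.pySetD_of_nonneg _ _ (by omega)]
    have htn : ((c + 1 : Nat) : Int).toNat = c + 1 := by omega
    rw [htn]
    rw [List.set_cons_succ]
    have hs : (List.replicate c (0 : Int) ++ x :: rest).set c 0
        = List.replicate c (0 : Int) ++ 0 :: rest := by
      have h2 := set_append_len (List.replicate c (0 : Int)) rest x 0
      simpa using h2
    rw [hs]
    simp [List.replicate_succ']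

-- the common canonical value both programs return
theorem A_eval (key : Int) (x : Int) (rest : List Int)
    (h : nzcat (digsP (PySem.Int.toChars key).length key) = x :: rest) :
    unlockingKey key = (PySem.Int.ofStr? (String.ofList (PySem.Int.toChars x
      ++ List.replicate ((digsP (PySem.Int.toChars key).length key).count 0) '0'
      ++ (rest.map PySem.Int.toChars).flatten))).getD 0 := by
  have hb := digs_bound (PySem.Int.toChars key).length key
  simp only [unlockingKey, mod10, fdiv10]
  rw [PySem.Str.len_eq, PySem.Int.toList_toStr]
  rw [loopA]
  have hplen : (PySem.List.pyRange 0 ((PySem.Int.toChars key).length : Int)).length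
      = (PySem.Int.toChars key).length := by
    rw [PySem.List.pyRange_zero_natCast]
    simp
  rw [hplen]
  dsimp only
  rw [List.nil_append]
  rw [sorted_canon _ hb, h]
  have hlen1 : (List.replicate ((digsP (PySem.Int.toChars key).length key).count 0) (0 : Int)
      ++ x :: rest).length = (PySem.Int.toChars key).length := by
    calc (List.replicate ((digsP (PySem.Int.toChars key).length key).count 0) (0 : Int)
        ++ x :: rest).length
        = (List.replicate ((digsP (PySem.Int.toChars key).length key).count 0) (0 : Int)
          ++ nzcat (digsP (PySem.Int.toChars key).length key)).length := by rw [h]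
    _ = (PySem.List.sorted (digsP (PySem.Int.toChars key).length key) (fun x => x) false).length := by
        rw [sorted_canon _ hb]
    _ = (digsP (PySem.Int.toChars key).length key).length := PySem.List.length_sorted _ _ _
    _ = (PySem.Int.toChars key).length := digs_len _ _
  rw [show (((PySem.Int.toChars key).length : Int))
      = ((List.replicate ((digsP (PySem.Int.toChars key).length key).count 0) (0 : Int)
        ++ x :: rest).length : Int) from by rw [hlen1]]
  have hcl := PySem.List.foldl_pyRange_zero_pyGetD'
      (List.replicate ((digsP (PySem.Int.toChars key).length key).count 0) (0 : Int) ++ x :: rest)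
      (0 : Int) (fun (c v : Int) => if v == 0 then c + 1 else c) (0 : Int)
  simp only at hcl
  rw [hcl]
  rw [PySem.List.foldl_beq_add_one]
  simp only [zero_add]
  have hcnt0 : List.count 0 (List.replicate
      ((digsP (PySem.Int.toChars key).length key).count 0) (0 : Int) ++ x :: rest)
      = (digsP (PySem.Int.toChars key).length key).count 0 := by
    have hz : List.count (0 : Int) (x :: rest) = 0 := by
      apply List.count_eq_zero.mpr
      intro hm
      exact nz_mem_ne_zero _ 0 (h ▸ hm) rfl
    simp [List.count_append, hz]
  rw [hcnt0]
  rw [swap_part]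
  have hstr : PySem.Str.join "" ((x :: List.replicate
      ((digsP (PySem.Int.toChars key).length key).count 0) (0 : Int) ++ rest).map
        (fun i => PySem.Int.toStr i))
      = String.ofList (PySem.Int.toChars x
        ++ List.replicate ((digsP (PySem.Int.toChars key).length key).count 0) '0'
        ++ (rest.map PySem.Int.toChars).flatten) := by
    apply String.ext
    rw [PySem.Str.toList_join]
    simp only [List.map_map, Function.comp_def, PySem.Int.toList_toStr]
    have hemp : ("" : String).toList = [] := by simp
    rw [hemp, join_empty_flatten]
    simp [List.map_append, List.map_replicate,
      show PySem.Int.toChars 0 = ['0'] from by decide]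
  rw [hstr]

theorem B_eval (key : Int) (x : Int) (rest : List Int)
    (h : nzcat (digsP (PySem.Int.toChars key).length key) = x :: rest) :
    unlockingKey_alt key = (PySem.Int.ofStr? (String.ofList (PySem.Int.toChars x
      ++ List.replicate ((digsP (PySem.Int.toChars key).length key).count 0) '0'
      ++ (rest.map PySem.Int.toChars).flatten))).getD 0 := by
  simp only [unlockingKey_alt, mod10, fdiv10]
  rw [PySem.Str.len_eq, PySem.Int.toList_toStr]
  have hrep : PySem.List.pyRepeat [(0 : Int)] 10 = List.replicate 10 (0 : Int) := by
    rw [PySem.List.pyRepeat_singleton]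
    rfl
  rw [hrep]
  have hplen : (PySem.List.pyRange 0 ((PySem.Int.toChars key).length : Int)).length
      = (PySem.Int.toChars key).length := by
    rw [PySem.List.pyRange_zero_natCast]
    simp
  have hinit : ∀ d : Int, 0 ≤ d → d < 10 →
      PySem.List.pyGetD (List.replicate 10 (0 : Int)) d 0 = 0 := by
    intro d h0 h10
    rw [PySem.List.pyGetD_eq_getElem _ _ h0 (by rw [List.length_replicate]; exact_mod_cast h10)]
    simp only [List.getElem_replicate]
  have hc : ∀ d : Int, 0 ≤ d → d < 10 →
      PySem.List.pyGetD ((PySem.List.pyRange 0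
          ((PySem.Int.toChars key).length : Int)).foldl (fun (st : List Int × Int) _ =>
          (PySem.List.pySetD st.1 (st.2 % 10)
            (PySem.List.pyGetD st.1 (st.2 % 10) 0 + 1),
           st.2 / 10)) (List.replicate 10 (0 : Int), key)).1 d 0
      = (((digsP (PySem.Int.toChars key).length key).count d : Nat) : Int) := by
    intro d h0 h10
    rw [loopB_get _ _ _ (by simp) d h0 h10, hinit d h0 h10, hplen, zero_add]
  rw [show PySem.List.pyRange 1 10 = [1, 2, 3, 4, 5, 6, 7, 8, 9] from by decide]
  simp only [List.flatMap_cons, List.flatMap_nil, List.append_nil]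
  rw [hc 0 (by norm_num) (by norm_num), hc 1 (by norm_num) (by norm_num),
    hc 2 (by norm_num) (by norm_num), hc 3 (by norm_num) (by norm_num),
    hc 4 (by norm_num) (by norm_num), hc 5 (by norm_num) (by norm_num),
    hc 6 (by norm_num) (by norm_num), hc 7 (by norm_num) (by norm_num),
    hc 8 (by norm_num) (by norm_num), hc 9 (by norm_num) (by norm_num)]
  simp only [PySem.List.pyRange_zero_natCast, List.map_map, Function.comp_def,
    List.map_const', List.length_range]
  have hnz : List.replicate ((digsP (PySem.Int.toChars key).length key).count 1) (1 : Int)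
      ++ (List.replicate ((digsP (PySem.Int.toChars key).length key).count 2) (2 : Int)
      ++ (List.replicate ((digsP (PySem.Int.toChars key).length key).count 3) (3 : Int)
      ++ (List.replicate ((digsP (PySem.Int.toChars key).length key).count 4) (4 : Int)
      ++ (List.replicate ((digsP (PySem.Int.toChars key).length key).count 5) (5 : Int)
      ++ (List.replicate ((digsP (PySem.Int.toChars key).length key).count 6) (6 : Int)
      ++ (List.replicate ((digsP (PySem.Int.toChars key).length key).count 7) (7 : Int)
      ++ (List.replicate ((digsP (PySem.Int.toChars key).length key).count 8) (8 : Int)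
      ++ List.replicate ((digsP (PySem.Int.toChars key).length key).count 9) (9 : Int))))))))
      = x :: rest := by
    rw [← h]
    simp [nzcat]
  rw [hnz]
  rw [PySem.List.pyGetD_zero_cons]
  have hslice : PySem.List.slice (x :: rest) (some 1) none = rest := by
    rw [PySem.List.slice_from _ (by norm_num)]
    simp
  rw [hslice]
  have htn : ((((digsP (PySem.Int.toChars key).length key).count 0 : Nat) : Int)).toNat
      = (digsP (PySem.Int.toChars key).length key).count 0 := by omega
  rw [htn]
  have hstr : PySem.Int.toStr x
      ++ String.ofList (List.replicate ((digsP (PySem.Int.toChars key).length key).count 0) '0')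
      ++ PySem.Str.join "" (rest.map PySem.Int.toStr)
      = String.ofList (PySem.Int.toChars x
        ++ List.replicate ((digsP (PySem.Int.toChars key).length key).count 0) '0'
        ++ (rest.map PySem.Int.toChars).flatten) := by
    apply String.ext
    simp only [String.toList_append]
    rw [PySem.Str.toList_join]
    have hemp : ("" : String).toList = [] := by simp
    rw [hemp, join_empty_flatten]
    simp [List.map_map, Function.comp_def, PySem.Int.toList_toStr]
  rw [hstr]

-- ===== VERDICT (by name: the statement is the Claim_ definition above) =====
theorem unlockingKey_spec : Claim_equal_unlockingKey := by
  intro key _ hpre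
  unfold Spec_unlockingKey
  have hnz : nzcat (digsP (PySem.Int.toChars key).length key) ≠ [] :=
    nz_ne_nil _ (digs_bound _ _) (exists_nonzero key hpre)
  rcases hx : nzcat (digsP (PySem.Int.toChars key).length key) with _ | ⟨x, rest⟩
  · exact absurd hx hnz
  · rw [A_eval key x rest hx, B_eval key x rest hx]
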